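-- pv_equiv track=rewrite | github.com/atvKail/solve | SolutionsOnSites/Codeforces/Codeforces Round 1005 (Div. 2)/B.py | solve
-- ===== SOURCE A (Python) =====
-- def solve(n, a):
--     freq = {}
--     for x in a:
--         freq[x] = freq.get(x, 0) + 1
--
--     bstl, bstr = 0, 0
--     bstlen = 0
--
--     currl = None
--     currlen = 0
--     for i in range(n):
--         if freq[a[i]] == 1:
--             if currl is None:
--                 currl = i
--                 currlen = 1
--             else:
--                 currlen += 1
--         else:
--             if currl is not None:
--                 if currlen > bstlen:
--                     bstlen = currlen
--                     bstl, bstr = currl, i - 1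
--                 currl = None
--                 currlen = 0
--     if currl is not None:
--         if currlen > bstlen:
--             bstlen = currlen
--             bstl, bstr = currl, n - 1
--
--     if bstlen == 0:
--         return "0"
--     else:
--         return f"{bstl + 1} {bstr + 1}"
-- ===== SOURCE B (Python) =====
-- def solve(n, a):
--     freq = {}
--     for x in a:
--         freq[x] = freq.get(x, 0) + 1
--     good = [freq[a[i]] == 1 for i in range(n)]
--     # collect every maximal run of unique elements as (l, r) index pairs
--     runs = []
--     i = 0
--     m = len(good)
--     while i < m:
--         if good[i]:
--             j = i
--             while j + 1 < m and good[j + 1]: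
--                 j += 1
--             runs.append((i, j))
--             i = j + 1
--         else:
--             i += 1
--     if not runs:
--         return "0"
--     l, r = max(runs, key=lambda p: p[1] - p[0] + 1)
--     return f"{l + 1} {r + 1}"
-- ===== Notes on version B (the rewrite author's own statement) =====
-- stated objective: alternative
-- what changed: Instead of maintaining best/current run state inline in one scan with a final flush, B first materialises the list of all maximal runs of frequency-1 elements as (l,r) index pairs and then selects the longest with max(key=length), which returns the first maximum and so reproduces A's strict '>' first-wins tie-breaking.
import Mathlib
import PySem

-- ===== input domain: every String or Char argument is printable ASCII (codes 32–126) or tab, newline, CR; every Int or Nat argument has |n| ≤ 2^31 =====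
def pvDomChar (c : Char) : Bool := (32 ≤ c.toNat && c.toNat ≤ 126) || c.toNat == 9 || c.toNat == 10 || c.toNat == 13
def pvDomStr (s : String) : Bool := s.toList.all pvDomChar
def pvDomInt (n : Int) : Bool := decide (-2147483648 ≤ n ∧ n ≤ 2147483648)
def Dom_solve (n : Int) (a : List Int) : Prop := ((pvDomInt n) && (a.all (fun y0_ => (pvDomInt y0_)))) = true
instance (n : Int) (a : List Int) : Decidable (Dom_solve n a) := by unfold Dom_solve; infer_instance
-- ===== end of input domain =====

-- B replaces A's inline best/current run bookkeeping by first collecting all maximal runs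
-- of frequency-1 elements and then selecting the longest (first-wins): an alternative
-- decomposition of the same O(n) task.

-- ===== PORT A =====
-- literal transliteration of A: one fold builds the frequency dict, a second fold over
-- range(n) maintains (bstl, bstr, bstlen, currl, currlen), then the final flush and format.
-- freq[a[i]] is ported with getD 0: under Pre_solve the index and the key always exist.
def solve (n : Int) (a : List Int) : String :=
  let freq := a.foldl (fun d x => d.insert x (d.getD x 0 + 1)) (PySem.Dict.empty : PySem.Dict Int Int)
  let st :=
    (PySem.List.pyRange 0 n 1).foldl
      (fun st i =>
        match st with
        | (bstl, bstr, bstlen, currl, currlen) =>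
          if freq.getD (PySem.List.pyGetD a i 0) 0 == 1 then
            match currl with
            | none => (bstl, bstr, bstlen, some i, (1 : Int))
            | some _ => (bstl, bstr, bstlen, currl, currlen + 1)
          else
            match currl with
            | some c =>
              if currlen > bstlen then (c, i - 1, currlen, (none : Option Int), (0 : Int))
              else (bstl, bstr, bstlen, (none : Option Int), (0 : Int))
            | none => (bstl, bstr, bstlen, currl, currlen))
      ((0 : Int), (0 : Int), (0 : Int), (none : Option Int), (0 : Int))
  match st with
  | (bstl, bstr, bstlen, currl, currlen) =>
    let fin :=
      match currl with
      | some c => if currlen > bstlen then (c, n - 1, currlen) else (bstl, bstr, bstlen)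
      | none => (bstl, bstr, bstlen)
    if fin.2.2 == (0 : Int) then "0"
    else PySem.Int.toStr (fin.1 + 1) ++ " " ++ PySem.Int.toStr (fin.2.1 + 1)

-- ===== PORT B =====
-- Source B's outer while loop over indices: recursion on the boolean list; the inner
-- 'while j + 1 < m and good[j + 1]' scan is the takeWhile/dropWhile split.
def pvRuns : List Bool → Int → List (Int × Int)
  | [], _ => []
  | b :: rest, i =>
    if b then
      let k := (rest.takeWhile (fun x => x)).length
      (i, i + (k : Int)) :: pvRuns (rest.dropWhile (fun x => x)) (i + (k : Int) + 1)
    else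
      pvRuns rest (i + 1)
termination_by good _ => good.length
decreasing_by
  · have := (List.dropWhile_sublist (p := fun x => x) (l := rest)).length_le
    simp; omega
  · simp

def solve_alt (n : Int) (a : List Int) : String :=
  let freq := a.foldl (fun d x => d.insert x (d.getD x 0 + 1)) (PySem.Dict.empty : PySem.Dict Int Int)
  let good := (PySem.List.pyRange 0 n 1).map (fun i => freq.getD (PySem.List.pyGetD a i 0) 0 == 1)
  let runs := pvRuns good 0
  match PySem.List.max? runs (fun p => p.2 - p.1 + 1) with
  | none => "0"
  | some p => PySem.Int.toStr (p.1 + 1) ++ " " ++ PySem.Int.toStr (p.2 + 1)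

-- ===== PRECONDITION & SPEC =====
-- Pre_: A reads a[0..n-1], so it raises IndexError (or KeyError) iff n > len(a);
-- exactly those inputs are excluded. Negative n is fine (range(n) is empty).
def Pre_solve (n : Int) (a : List Int) : Prop := n ≤ (a.length : Int)
instance (n : Int) (a : List Int) : Decidable (Pre_solve n a) := by unfold Pre_solve; infer_instance
def pvWitness_solve : Int × List Int := (3, [1, 2, 2])
def Spec_solve (n : Int) (a : List Int) (out : String) : Prop := out = solve_alt n a
instance (n : Int) (a : List Int) (out : String) : Decidable (Spec_solve n a out) := by unfold Spec_solve; infer_instance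

-- ===== CLAIM (what is proved, stated in full; the proofs are below) =====
def Claim_equal_solve : Prop := ∀ (n : Int) (a : List Int), Dom_solve n a → Pre_solve n a → Spec_solve n a (solve n a)

-- ===== LEMMAS AND PROOFS =====

-- A's loop body with the boolean 'freq[a[i]] == 1' abstracted out
def pvStepB (b : Bool) (i : Int) (st : Int × Int × Int × Option Int × Int) :
    Int × Int × Int × Option Int × Int :=
  match st with
  | (bstl, bstr, bstlen, currl, currlen) =>
    if b then
      match currl with
      | none => (bstl, bstr, bstlen, some i, (1 : Int))
      | some _ => (bstl, bstr, bstlen, currl, currlen + 1)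
    else
      match currl with
      | some c =>
        if currlen > bstlen then (c, i - 1, currlen, (none : Option Int), (0 : Int))
        else (bstl, bstr, bstlen, (none : Option Int), (0 : Int))
      | none => (bstl, bstr, bstlen, currl, currlen)

def pvScan : List Bool → Int → (Int × Int × Int × Option Int × Int) → Int × Int × Int × Option Int × Int
  | [], _, st => st
  | b :: rest, i, st => pvScan rest (i + 1) (pvStepB b i st)

def pvFlush (e : Int) (st : Int × Int × Int × Option Int × Int) : Int × Int × Int :=
  match st with
  | (bstl, bstr, bstlen, currl, currlen) =>
    match currl with
    | some c => if currlen > bstlen then (c, e - 1, currlen) else (bstl, bstr, bstlen)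
    | none => (bstl, bstr, bstlen)

def pvFormat (t : Int × Int × Int) : String :=
  if t.2.2 == (0 : Int) then "0"
  else PySem.Int.toStr (t.1 + 1) ++ " " ++ PySem.Int.toStr (t.2.1 + 1)

def pvSel (st : Int × Int × Int) (runs : List (Int × Int)) : Int × Int × Int :=
  runs.foldl (fun b p => if p.2 - p.1 + 1 > b.2.2 then (p.1, p.2, p.2 - p.1 + 1) else b) st

def pvMaxF (q : Int × Int) (rs : List (Int × Int)) : Int × Int :=
  rs.foldl (fun m p => if m.2 - m.1 + 1 < p.2 - p.1 + 1 then p else m) q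

def pvFreqOf (a : List Int) : PySem.Dict Int Int :=
  a.foldl (fun d x => d.insert x (d.getD x 0 + 1)) (PySem.Dict.empty : PySem.Dict Int Int)

def pvGood (n : Int) (a : List Int) : List Bool :=
  (PySem.List.pyRange 0 n 1).map (fun i => (pvFreqOf a).getD (PySem.List.pyGetD a i 0) 0 == 1)

lemma pyRange_foldl_scan (g : Int → Bool) (hi : Int) :
    ∀ (m : Nat) (lo : Int) (st : Int × Int × Int × Option Int × Int), (hi - lo).toNat = m →
      (PySem.List.pyRange lo hi 1).foldl (fun st i => pvStepB (g i) i st) st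
        = pvScan ((PySem.List.pyRange lo hi 1).map g) lo st := by
  intro m
  induction m with
  | zero =>
    intro lo st h
    rw [PySem.List.pyRange_one_eq_nil (by omega)]
    simp [pvScan]
  | succ m ih =>
    intro lo st h
    rw [PySem.List.pyRange_one_cons (by omega)]
    simp only [List.foldl_cons, List.map_cons, pvScan]
    exact ih (lo + 1) _ (by omega)

lemma scan_replicate (k : Nat) :
    ∀ (rest : List Bool) (i bl br bk c cn : Int),
      pvScan (List.replicate k true ++ rest) i (bl, br, bk, some c, cn)
        = pvScan rest (i + (k : Int)) (bl, br, bk, some c, cn + (k : Int)) := by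
  induction k with
  | zero => intro rest i bl br bk c cn; simp [List.replicate]
  | succ k ih =>
    intro rest i bl br bk c cn
    have h1 : List.replicate (k + 1) true ++ rest = true :: (List.replicate k true ++ rest) := by
      simp [List.replicate_succ]
    rw [h1]
    show pvScan (List.replicate k true ++ rest) (i + 1) (bl, br, bk, some c, cn + 1) = _
    rw [ih]
    push_cast
    ring_nf

lemma scan_runs (good : List Bool) (i0 : Int) :
    ∀ bl br bk : Int,
      pvFlush (i0 + good.length) (pvScan good i0 (bl, br, bk, none, 0))
        = pvSel (bl, br, bk) (pvRuns good i0) := by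
  induction good, i0 using pvRuns.induct with
  | case1 i =>
    intro bl br bk
    simp [pvScan, pvRuns, pvFlush, pvSel]
  | case2 rest i kk ih =>
    intro bl br bk
    obtain ⟨k, hk⟩ : ∃ m, (rest.takeWhile (fun x => x)).length = m := ⟨_, rfl⟩
    obtain ⟨rest', hrest'⟩ : ∃ r, rest.dropWhile (fun x => x) = r := ⟨_, rfl⟩
    have hkk : kk = k := hk
    rw [hkk, hrest'] at ih
    have hsplit : rest = List.replicate k true ++ rest' := by
      conv_lhs => rw [← List.takeWhile_append_dropWhile (p := fun x => x) (l := rest)]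
      rw [hrest']
      congr 1
      rw [← hk]
      exact List.eq_replicate_of_mem (fun x hx => List.mem_takeWhile_imp hx)
    have hruns : pvRuns (true :: rest) i = (i, i + (k : Int)) :: pvRuns rest' (i + (k : Int) + 1) := by
      rw [pvRuns]
      simp [hk, hrest']
    have hscan1 : pvScan (true :: rest) i (bl, br, bk, none, 0)
        = pvScan rest' (i + 1 + (k : Int)) (bl, br, bk, some i, 1 + (k : Int)) := by
      show pvScan rest (i + 1) (bl, br, bk, some i, 1) = _
      conv_lhs => rw [hsplit]
      exact scan_replicate k rest' (i + 1) bl br bk i 1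
    have hlen : ((true :: rest).length : Int) = 1 + (k : Int) + (rest'.length : Int) := by
      rw [List.length_cons, hsplit]
      push_cast [List.length_append, List.length_replicate]
      ring
    rw [hscan1, hruns]
    cases hre : rest' with
    | nil =>
      rw [hre] at hlen
      simp only [List.length_nil, Nat.cast_zero, add_zero] at hlen
      simp only [pvScan, pvRuns, pvSel, List.foldl_cons, List.foldl_nil]
      have hc : (i + (k : Int)) - i + 1 = 1 + (k : Int) := by ring
      rw [hc]
      by_cases hgt : 1 + (k : Int) > bk
      · rw [if_pos hgt]
        simp only [pvFlush]
        rw [if_pos hgt]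
        have he : i + ((true :: rest).length : Int) - 1 = i + (k : Int) := by
          rw [hlen]; ring
        rw [he]
      · rw [if_neg hgt]
        simp only [pvFlush]
        rw [if_neg hgt]
    | cons b' rest'' =>
      have hb' : b' = false := by
        have h := List.head?_dropWhile_not (fun x => x) rest
        rw [hrest', hre] at h
        simpa using h
      subst hb'
      rw [hre] at hlen
      -- one more step of the scan: the false element closes the open run
      have hstep : pvScan (false :: rest'') (i + 1 + (k : Int)) (bl, br, bk, some i, 1 + (k : Int))
          = pvScan rest'' (i + 1 + (k : Int) + 1)
              (if 1 + (k : Int) > bk then (i, i + 1 + (k : Int) - 1, 1 + (k : Int), (none : Option Int), (0 : Int))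
               else (bl, br, bk, (none : Option Int), (0 : Int))) := rfl
      rw [hstep]
      rw [hre] at ih
      -- the IH is about scanning false :: rest'' from a clean state
      have ihflat : ∀ bl2 br2 bk2 : Int,
          pvFlush ((i + (k : Int) + 1) + ((false :: rest'').length : Int))
              (pvScan rest'' (i + (k : Int) + 2) (bl2, br2, bk2, none, 0))
            = pvSel (bl2, br2, bk2) (pvRuns rest'' (i + (k : Int) + 2)) := by
        intro bl2 br2 bk2
        have h1 := ih bl2 br2 bk2
        have h2 : pvScan (false :: rest'') (i + (k : Int) + 1) (bl2, br2, bk2, none, 0)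
            = pvScan rest'' (i + (k : Int) + 1 + 1) (bl2, br2, bk2, none, 0) := rfl
        have h3 : pvRuns (false :: rest'') (i + (k : Int) + 1) = pvRuns rest'' (i + (k : Int) + 2) := by
          rw [pvRuns]
          simp
          congr 1
          ring
        have h4 : i + (k : Int) + 1 + 1 = i + (k : Int) + 2 := by ring
        rw [h2, h4, h3] at h1
        exact h1
      have hidx : i + ((true :: rest).length : Int)
          = (i + (k : Int) + 1) + ((false :: rest'').length : Int) := by
        rw [hlen]; ring
      have hidx2 : i + 1 + (k : Int) + 1 = i + (k : Int) + 2 := by ring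
      rw [hidx, hidx2]
      -- peel the first run off pvSel
      have hsel : pvSel (bl, br, bk) ((i, i + (k : Int)) :: pvRuns (false :: rest'') (i + (k : Int) + 1))
          = pvSel (if (i + (k : Int)) - i + 1 > bk then (i, i + (k : Int), (i + (k : Int)) - i + 1) else (bl, br, bk))
              (pvRuns (false :: rest'') (i + (k : Int) + 1)) := rfl
      rw [hsel]
      have h3 : pvRuns (false :: rest'') (i + (k : Int) + 1) = pvRuns rest'' (i + (k : Int) + 2) := by
        rw [pvRuns]
        simp
        congr 1
        ring
      rw [h3]
      have hc : (i + (k : Int)) - i + 1 = 1 + (k : Int) := by ring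
      rw [hc]
      by_cases hgt : 1 + (k : Int) > bk
      · rw [if_pos hgt, if_pos hgt]
        have he : i + 1 + (k : Int) - 1 = i + (k : Int) := by ring
        rw [he]
        exact ihflat i (i + (k : Int)) (1 + (k : Int))
      · rw [if_neg hgt, if_neg hgt]
        exact ihflat bl br bk
  | case3 b rest i hb ih =>
    intro bl br bk
    have hbf : b = false := by
      cases b
      · rfl
      · exact absurd rfl hb
    subst hbf
    have h2 : pvScan (false :: rest) i (bl, br, bk, none, 0)
        = pvScan rest (i + 1) (bl, br, bk, none, 0) := rfl
    have h3 : pvRuns (false :: rest) i = pvRuns rest (i + 1) := by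
      rw [pvRuns]
      simp
    have hlen : i + ((false :: rest).length : Int) = (i + 1) + (rest.length : Int) := by
      push_cast [List.length_cons]; ring
    rw [h2, h3, hlen]
    exact ih bl br bk

lemma sel_eq_max (rs : List (Int × Int)) :
    ∀ l0 r0 : Int,
      pvSel (l0, r0, r0 - l0 + 1) rs
        = ((pvMaxF (l0, r0) rs).1, (pvMaxF (l0, r0) rs).2,
           (pvMaxF (l0, r0) rs).2 - (pvMaxF (l0, r0) rs).1 + 1) := by
  induction rs with
  | nil => intro l0 r0; simp [pvSel, pvMaxF]
  | cons p rs ih =>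
    intro l0 r0
    simp only [pvSel, pvMaxF, List.foldl_cons]
    by_cases h : r0 - l0 + 1 < p.2 - p.1 + 1
    · rw [if_pos h, if_pos h]
      exact ih p.1 p.2
    · rw [if_neg h, if_neg h]
      exact ih l0 r0

lemma key_maxF_ge (rs : List (Int × Int)) :
    ∀ q0 : Int × Int, q0.2 - q0.1 + 1 ≤ (pvMaxF q0 rs).2 - (pvMaxF q0 rs).1 + 1 := by
  induction rs with
  | nil => intro q0; simp [pvMaxF]
  | cons p rs ih =>
    intro q0
    simp only [pvMaxF, List.foldl_cons]
    by_cases h : q0.2 - q0.1 + 1 < p.2 - p.1 + 1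
    · rw [if_pos h]
      exact le_trans (le_of_lt h) (ih p)
    · rw [if_neg h]
      exact ih q0

def pvOptStep (acc : Option (Int × Int)) (x : Int × Int) : Option (Int × Int) :=
  match acc with
  | none => some x
  | some m => if m.2 - m.1 + 1 < x.2 - x.1 + 1 then some x else some m

lemma foldl_optstep (rs : List (Int × Int)) :
    ∀ q : Int × Int, rs.foldl pvOptStep (some q) = some (pvMaxF q rs) := by
  induction rs with
  | nil => intro q; simp [pvMaxF]
  | cons x rs ih =>
    intro q
    show List.foldl pvOptStep (if q.2 - q.1 + 1 < x.2 - x.1 + 1 then some x else some q) rs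
      = some (pvMaxF (if q.2 - q.1 + 1 < x.2 - x.1 + 1 then x else q) rs)
    split_ifs with h
    · exact ih x
    · exact ih q

lemma max?_cons (p : Int × Int) (rs : List (Int × Int)) :
    PySem.List.max? (p :: rs) (fun p => p.2 - p.1 + 1) = some (pvMaxF p rs) := by
  have h : PySem.List.max? (p :: rs) (fun p => p.2 - p.1 + 1) = rs.foldl pvOptStep (some p) := by
    simp only [PySem.List.max?, List.foldl_cons]
    congr 1
    funext acc x
    cases acc <;> rfl
  rw [h, foldl_optstep rs p]

lemma pvRuns_mem : ∀ (good : List Bool) (i0 : Int) (p : Int × Int), p ∈ pvRuns good i0 → p.1 ≤ p.2 := by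
  intro good i0
  induction good, i0 using pvRuns.induct with
  | case1 i => simp [pvRuns]
  | case2 rest i kk ih =>
    intro p hp
    rw [pvRuns] at hp
    simp at hp
    rcases hp with h | h
    · subst h
      simp
    · exact ih p h
  | case3 b rest i hb ih =>
    intro p hp
    rw [pvRuns] at hp
    rw [if_neg hb] at hp
    exact ih p hp

lemma solve_eq_scan (n : Int) (a : List Int) :
    solve n a = pvFormat (pvFlush n (pvScan (pvGood n a) 0 (0, 0, 0, none, 0))) := by
  unfold solve
  dsimp only
  rw [List.foldl_ext _
      (fun st i => pvStepB ((pvFreqOf a).getD (PySem.List.pyGetD a i 0) 0 == 1) i st) _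
      (by intro st i _; rcases st with ⟨bl, br, bk, cl, cn⟩; rfl)]
  rw [pyRange_foldl_scan (fun i => (pvFreqOf a).getD (PySem.List.pyGetD a i 0) 0 == 1) n
      (n - 0).toNat 0 _ rfl]
  rcases hs : pvScan (pvGood n a) 0 (0, 0, 0, none, 0) with ⟨bl, br, bk, cl, cn⟩
  rw [show ((PySem.List.pyRange 0 n 1).map
      (fun i => (pvFreqOf a).getD (PySem.List.pyGetD a i 0) 0 == 1)) = pvGood n a from rfl, hs]
  cases cl <;> rfl

lemma solve_alt_eq (n : Int) (a : List Int) :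
    solve_alt n a =
      match PySem.List.max? (pvRuns (pvGood n a) 0) (fun p => p.2 - p.1 + 1) with
      | none => "0"
      | some p => PySem.Int.toStr (p.1 + 1) ++ " " ++ PySem.Int.toStr (p.2 + 1) := by
  rfl

lemma solve_agree (n : Int) (a : List Int) : solve n a = solve_alt n a := by
  rw [solve_eq_scan, solve_alt_eq]
  rcases Int.lt_or_le n 0 with hn | hn
  · have hg : pvGood n a = [] := by
      simp [pvGood, PySem.List.pyRange_one_eq_nil (by omega : n ≤ (0 : Int))]
    rw [hg]
    simp [pvScan, pvRuns, pvFlush, pvFormat, PySem.List.max?]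
  · have hsr := scan_runs (pvGood n a) 0 0 0 0
    rw [show (0 : Int) + ((pvGood n a).length : Int) = n from by
      simp [pvGood, PySem.List.length_pyRange_one]; omega] at hsr
    rw [hsr]
    cases hr : pvRuns (pvGood n a) 0 with
    | nil => simp [pvSel, pvFormat, PySem.List.max?]
    | cons p rest =>
      have hp : p.1 ≤ p.2 := pvRuns_mem _ _ p (by rw [hr]; exact List.mem_cons_self)
      have h1 : pvSel (0, 0, 0) (p :: rest) = pvSel (p.1, p.2, p.2 - p.1 + 1) rest := by
        show pvSel (if p.2 - p.1 + 1 > (0 : Int) then (p.1, p.2, p.2 - p.1 + 1) else (0, 0, 0)) rest = _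
        rw [if_pos (by omega)]
      rw [h1, sel_eq_max, max?_cons]
      have h2 := key_maxF_ge rest (p.1, p.2)
      simp only [pvFormat]
      rw [if_neg ?hne]
      case hne =>
        simp at h2 ⊢
        omega

-- ===== VERDICT (by name: the statement is the Claim_ definition above) =====
theorem solve_spec : Claim_equal_solve := by
  intro n a _ _
  unfold Spec_solve
  exact solve_agree n a
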